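-- pv_equiv track=rewrite | github.com/niyati2829/21DaysOfCode-2025 | Quiz 3/q3_solution.py | k_frequency_sum
-- ===== SOURCE A (Python) =====
-- def k_frequency_sum(nums, k):
--     from collections import Counter
--     freq = Counter(nums)
--     total = 0
--
--     for num, count in freq.items():
--         if count == k:
--             total += num
--
--     return total
-- ===== SOURCE B (Python) =====
-- def k_frequency_sum(nums, k):
--     s = sorted(nums)
--     total = 0
--     i = 0
--     n = len(s)
--     while i < n:
--         j = i + 1
--         while j < n and s[j] == s[i]:
--             j += 1
--         if j - i == k:
--             total += s[i]
--         i = j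
--     return total
-- ===== Notes on version B (the rewrite author's own statement) =====
-- stated objective: alternative
-- what changed: Replaced the Counter hash-map frequency table by sort-then-run-length-scan: B sorts nums and sums the first element of each maximal run whose length equals k.
import Mathlib
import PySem

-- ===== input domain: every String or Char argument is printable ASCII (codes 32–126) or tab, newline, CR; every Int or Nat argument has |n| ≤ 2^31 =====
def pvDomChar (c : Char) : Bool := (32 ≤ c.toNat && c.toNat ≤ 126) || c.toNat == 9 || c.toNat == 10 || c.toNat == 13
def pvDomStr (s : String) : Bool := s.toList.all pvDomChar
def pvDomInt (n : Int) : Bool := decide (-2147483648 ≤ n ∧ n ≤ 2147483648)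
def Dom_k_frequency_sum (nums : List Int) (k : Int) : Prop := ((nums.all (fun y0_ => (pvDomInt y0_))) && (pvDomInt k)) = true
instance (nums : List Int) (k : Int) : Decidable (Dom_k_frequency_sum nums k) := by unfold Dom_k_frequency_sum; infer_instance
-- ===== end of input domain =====

-- B replaces A's Counter hash map by sort-then-run-length scan (alternative algorithm, same results).

-- ===== PORT A =====
def k_frequency_sum (nums : List Int) (k : Int) : Int :=
  let freq := PySem.Dict.counter nums
  freq.items.foldl (fun total p => if p.2 = k then total + p.1 else total) 0

-- ===== PORT B =====
-- the outer while loop of Source B: each step consumes one maximal run of equal elements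
def kfsAltGo (k : Int) : List Int → Int
  | [] => 0
  | v :: rest =>
      let run := rest.takeWhile (fun x => x == v)
      let tail := rest.dropWhile (fun x => x == v)
      (if ((1 : Int) + run.length = k) then v else 0) + kfsAltGo k tail
  termination_by l => l.length
  decreasing_by
    simp only [List.length_cons]
    have := List.length_dropWhile_le (fun x => x == v) rest
    omega

def k_frequency_sum_alt (nums : List Int) (k : Int) : Int :=
  kfsAltGo k (PySem.List.sorted nums (fun x => x) false)

-- ===== PRECONDITION & SPEC =====
def Spec_k_frequency_sum (nums : List Int) (k : Int) (out : Int) : Prop := out = k_frequency_sum_alt nums k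
instance (nums : List Int) (k : Int) (out : Int) : Decidable (Spec_k_frequency_sum nums k out) := by unfold Spec_k_frequency_sum; infer_instance

-- ===== CLAIM (what is proved, stated in full; the proofs are below) =====
def Claim_equal_k_frequency_sum : Prop := ∀ (nums : List Int) (k : Int), Dom_k_frequency_sum nums k → Spec_k_frequency_sum nums k (k_frequency_sum nums k)

-- ===== LEMMAS AND PROOFS =====

-- A's accumulating loop is the sum of the conditional values
lemma kfs_foldl_eq_sum (k : Int) (items : List (Int × Int)) (t : Int) :
    items.foldl (fun total p => if p.2 = k then total + p.1 else total) t
      = t + (items.map (fun p => if p.2 = k then p.1 else 0)).sum := by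
  induction items generalizing t with
  | nil => simp
  | cons p rest ih =>
      simp only [List.foldl_cons, List.map_cons, List.sum_cons, ih]
      split_ifs <;> ring

-- A equals the sum, over the distinct values of nums, of those whose count is k
lemma kfs_A_characterization (nums : List Int) (k : Int) :
    k_frequency_sum nums k
      = ((PySem.Set.ofList nums).map
          (fun v => if ((nums.count v : Int)) = k then v else 0)).sum := by
  simp only [k_frequency_sum, kfs_foldl_eq_sum, PySem.Dict.items_counter, List.map_map,
    zero_add]
  rfl

-- in a sorted list, the value at the head does not recur after its run
lemma kfs_not_mem_dropWhile (v : Int) (l : List Int)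
    (h : (v :: l).Pairwise (· ≤ ·)) : v ∉ l.dropWhile (fun x => x == v) := by
  induction l with
  | nil => simp
  | cons x t ih =>
      by_cases hx : x = v
      · subst hx
        rw [List.dropWhile_cons_of_pos (by simp)]
        exact ih (by
          rcases List.pairwise_cons.1 h with ⟨h1, h2⟩
          rcases List.pairwise_cons.1 h2 with ⟨h3, h4⟩
          exact List.pairwise_cons.2 ⟨fun y hy => h1 y (List.mem_cons_of_mem _ hy), h4⟩)
      · rw [List.dropWhile_cons_of_neg (by simp [hx])]
        rcases List.pairwise_cons.1 h with ⟨h1, h2⟩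
        rcases List.pairwise_cons.1 h2 with ⟨h3, _⟩
        have hvx : v < x := lt_of_le_of_ne (h1 x (by simp)) (fun e => hx e.symm)
        intro hmem
        rcases List.mem_cons.1 hmem with e | hmem'
        · exact hx e.symm
        · exact absurd (h3 v hmem') (by omega)

-- B's run-length scan over a sorted list sums the distinct values whose count is k
lemma kfs_B_characterization (k : Int) :
    ∀ (l : List Int), l.Pairwise (· ≤ ·) →
      ∃ D : List Int, D.Nodup ∧ (∀ x, x ∈ D ↔ x ∈ l) ∧
        kfsAltGo k l = (D.map (fun v => if ((l.count v : Int)) = k then v else 0)).sum := by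
  intro l
  induction l using kfsAltGo.induct with
  | case1 => exact fun _ => ⟨[], by simp, by simp, by rw [kfsAltGo]; simp⟩
  | case2 v rest tl ih0 =>
      intro hs
      have htl : tl = rest.dropWhile (fun x => x == v) := rfl
      rw [htl] at ih0
      set run := rest.takeWhile (fun x => x == v) with hrundef
      set tail := rest.dropWhile (fun x => x == v) with htaildef
      have hsub : tail.Sublist (v :: rest) := by
        rw [htaildef]
        exact (List.dropWhile_sublist _).trans (List.sublist_cons_self _ _)
      have hst : tail.Pairwise (· ≤ ·) := hs.sublist hsub
      have hvt : v ∉ tail := by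
        rw [htaildef]; exact kfs_not_mem_dropWhile v rest hs
      obtain ⟨D, hD, hmem, hval⟩ := ih0 hst
      have hrest : run ++ tail = rest := by
        rw [hrundef, htaildef]; exact List.takeWhile_append_dropWhile
      have hrun : ∀ x ∈ run, x = v := by
        intro x hx
        rw [hrundef] at hx
        have := List.mem_takeWhile_imp hx
        simpa using this
      -- count of v in the whole list is 1 + run length
      have hcountv : (v :: rest).count v = 1 + run.length := by
        rw [← hrest, ← List.cons_append, List.count_append]
        have h1 : (v :: run).count v = (v :: run).length :=
          List.count_eq_length.2 (by
            intro b hb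
            rcases List.mem_cons.1 hb with e | hb'
            · exact e.symm
            · exact (hrun b hb').symm)
        have h2 : tail.count v = 0 := List.count_eq_zero.2 hvt
        simp [h1, h2]
        omega
      -- counts of other values are unchanged by dropping the run
      have hcountw : ∀ w ∈ tail, (v :: rest).count w = tail.count w := by
        intro w hw
        have hwv : w ≠ v := fun e => hvt (e ▸ hw)
        rw [← hrest, ← List.cons_append, List.count_append]
        have h1 : (v :: run).count w = 0 := List.count_eq_zero.2 (by
          intro hmem'
          rcases List.mem_cons.1 hmem' with e | hmem''
          · exact hwv e
          · exact hwv (hrun w hmem''))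
        omega
      refine ⟨v :: D, ?_, ?_, ?_⟩
      · exact List.nodup_cons.2 ⟨fun h => hvt ((hmem v).1 h), hD⟩
      · intro x
        constructor
        · intro hx
          rcases List.mem_cons.1 hx with e | hx'
          · exact e ▸ List.mem_cons_self
          · exact hsub.mem ((hmem x).1 hx')
        · intro hx
          rcases List.mem_cons.1 hx with e | hx'
          · exact e ▸ List.mem_cons_self
          · by_cases hxv : x = v
            · exact hxv ▸ List.mem_cons_self
            · apply List.mem_cons_of_mem
              apply (hmem x).2
              rw [← hrest] at hx'
              rcases List.mem_append.1 hx' with hr | ht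
              · exact absurd (hrun x hr) hxv
              · exact ht
      · have hstep : kfsAltGo k (v :: rest)
            = (if ((1 : Int) + run.length = k) then v else 0) + kfsAltGo k tail := by
          rw [kfsAltGo]
        rw [hstep, hval]
        simp only [List.map_cons, List.sum_cons]
        have hgoal1 : (if ((1 : Int) + run.length = k) then v else 0)
            = (if (((v :: rest).count v : Int)) = k then v else 0) := by
          rw [hcountv]; push_cast; ring_nf
        have hgoal2 :
            (D.map (fun w => if ((tail.count w : Int)) = k then w else 0))
              = (D.map (fun w => if (((v :: rest).count w : Int)) = k then w else 0)) := by
          apply List.map_congr_left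
          intro w hw
          rw [hcountw w ((hmem w).1 hw)]
        rw [hgoal1, hgoal2]

-- ===== VERDICT (by name: the statement is the Claim_ definition above) =====
theorem k_frequency_sum_spec : Claim_equal_k_frequency_sum := by
  intro nums k _
  show k_frequency_sum nums k = k_frequency_sum_alt nums k
  set s := PySem.List.sorted nums (fun x => x) false with hs
  have hperm : s.Perm nums := PySem.List.sorted_perm nums (fun x => x) false
  have hpw : s.Pairwise (· ≤ ·) := by
    simpa using PySem.List.sorted_pairwise nums (fun x => x)
  obtain ⟨D, hD, hmem, hval⟩ := kfs_B_characterization k s hpw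
  rw [kfs_A_characterization, k_frequency_sum_alt, ← hs, hval]
  have hcount : ∀ v, s.count v = nums.count v := fun v => hperm.count_eq v
  have hmap : (D.map (fun v => if ((s.count v : Int)) = k then v else 0))
      = (D.map (fun v => if ((nums.count v : Int)) = k then v else 0)) := by
    apply List.map_congr_left; intro w _; rw [hcount]
  rw [hmap]
  apply List.Perm.sum_eq
  apply List.Perm.map
  apply (List.perm_ext_iff_of_nodup (PySem.Set.nodup_ofList nums) hD).2
  intro a
  rw [hmem a, PySem.Set.mem_ofList, hperm.mem_iff]
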